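-- pv_equiv track=rewrite | github.com/arpita-ak/APS-2020 | Hackerrank solutions/Expert- String Similarity.py | stringSimilarity
-- ===== SOURCE A (Python) =====
-- def stringSimilarity(string):
--     n = len(string)
--     z=[0]*n
--     l, r, k = 0, 0, 0
--     for i in range(1, n):
--         if i > r:
--             l, r = i, i
--             while r < n and string[r - l] == string[r]:
--                 r += 1
--             z[i] = r - l
--             r -= 1
--         else:
--             k = i - l
--             if z[k] < r - i + 1:
--                 z[i] = z[k]
--             else:
--                 l = i
--                 while r < n and string[r - l] == string[r]:
--                     r += 1
--                 z[i] = r - l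
--                 r -= 1
--     return n+sum(z)
-- ===== SOURCE B (Python) =====
-- def stringSimilarity(string):
--     n = len(string)
--     total = 0
--     for i in range(n):
--         j = 0
--         while i + j < n and string[j] == string[i + j]:
--             j += 1
--         total += j
--     return total
-- ===== Notes on version B (the rewrite author's own statement) =====
-- stated objective: simpler
-- what changed: Replaces the Z-function algorithm (z-array with [l,r] window maintenance plus n+sum(z)) by the naive direct definition: for each start i, re-scan the common prefix of string and string[i:] from scratch and sum the match lengths.
import Mathlib
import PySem

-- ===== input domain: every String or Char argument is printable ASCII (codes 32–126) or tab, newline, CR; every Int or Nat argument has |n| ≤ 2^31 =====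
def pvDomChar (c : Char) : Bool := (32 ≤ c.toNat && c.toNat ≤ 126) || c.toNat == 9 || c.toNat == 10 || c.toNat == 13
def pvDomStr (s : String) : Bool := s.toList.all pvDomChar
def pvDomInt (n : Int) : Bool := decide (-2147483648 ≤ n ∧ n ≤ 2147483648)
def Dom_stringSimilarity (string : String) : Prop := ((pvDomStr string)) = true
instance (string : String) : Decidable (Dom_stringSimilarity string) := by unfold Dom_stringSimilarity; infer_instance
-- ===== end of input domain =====

-- B replaces A's Z-function (z-array, [l,r] window) by the naive direct definition —
-- re-scan the common prefix of string and string[i:] at every start i — for simplicity;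
-- O(n^2) instead of O(n), not faster.

-- ===== PORT A =====
-- `while r < n and string[r-l] == string[r]: r += 1` (all reached indices are in range)
def pvGoR (s : List Char) (l r : Nat) : Nat :=
  if r < s.length ∧ s.getD (r - l) ' ' = s.getD r ' ' then pvGoR s l (r + 1) else r
termination_by s.length - r
decreasing_by omega

-- one iteration of A's `for i in range(1, n)` over state (z, l, r, k)
def pvStepA (s : List Char) (st : List Nat × Nat × Nat × Nat) (i : Nat) :
    List Nat × Nat × Nat × Nat :=
  let (z, l, r, k) := st
  if i > r then
    let r1 := pvGoR s i i
    (z.set i (r1 - i), i, r1 - 1, k)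
  else
    let k1 := i - l
    if z.getD k1 0 < r - i + 1 then (z.set i (z.getD k1 0), l, r, k1)
    else
      let r1 := pvGoR s i r
      (z.set i (r1 - i), i, r1 - 1, k1)

def stringSimilarity (string : String) : Int :=
  let s := string.toList
  let n := s.length
  let st := (List.range' 1 (n - 1)).foldl (pvStepA s) (List.replicate n 0, 0, 0, 0)
  ((n + st.1.sum : Nat) : Int)

-- ===== PORT B =====
-- `j = 0; while i + j < n and string[j] == string[i+j]: j += 1` (indices in range)
def pvCountAt (s : List Char) (i j : Nat) : Nat :=
  if i + j < s.length ∧ s.getD j ' ' = s.getD (i + j) ' ' then pvCountAt s i (j + 1) else j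
termination_by s.length - (i + j)
decreasing_by omega

def stringSimilarity_alt (string : String) : Int :=
  let s := string.toList
  (((List.range s.length).foldl (fun total i => total + pvCountAt s i 0) 0 : Nat) : Int)

-- ===== PRECONDITION & SPEC =====
def Spec_stringSimilarity (string : String) (out : Int) : Prop := out = stringSimilarity_alt string
instance (string : String) (out : Int) : Decidable (Spec_stringSimilarity string out) := by unfold Spec_stringSimilarity; infer_instance

-- ===== CLAIM (what is proved, stated in full; the proofs are below) =====
def Claim_equal_stringSimilarity : Prop := ∀ (string : String), Dom_stringSimilarity string → Spec_stringSimilarity string (stringSimilarity string)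

-- ===== LEMMAS AND PROOFS =====

-- one position of agreement between s and its suffix starting at i
def pvCond (s : List Char) (i t : Nat) : Prop :=
  i + t < s.length ∧ s.getD t ' ' = s.getD (i + t) ' '

theorem pvCountAt_ge (s : List Char) (i j : Nat) : j ≤ pvCountAt s i j := by
  induction j using pvCountAt.induct s i with
  | case1 j hc ih => rw [pvCountAt, if_pos hc]; omega
  | case2 j hc => rw [pvCountAt, if_neg hc]

theorem pvCountAt_stop (s : List Char) (i j : Nat) : ¬ pvCond s i (pvCountAt s i j) := by
  induction j using pvCountAt.induct s i with
  | case1 j hc ih => rwa [pvCountAt, if_pos hc]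
  | case2 j hc => rw [pvCountAt, if_neg hc]; exact hc

theorem pvCountAt_mem (s : List Char) (i j t : Nat) (h1 : j ≤ t)
    (h2 : t < pvCountAt s i j) : pvCond s i t := by
  induction j using pvCountAt.induct s i with
  | case1 j hc ih =>
    rcases Nat.eq_or_lt_of_le h1 with h | h
    · exact h ▸ hc
    · exact ih h (by rwa [pvCountAt, if_pos hc] at h2)
  | case2 j hc => rw [pvCountAt, if_neg hc] at h2; omega

theorem pvCountAt_congr (s : List Char) (i j : Nat) (h : ∀ t < j, pvCond s i t) :
    pvCountAt s i 0 = pvCountAt s i j := by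
  induction j with
  | zero => rfl
  | succ j ih =>
    have hj : pvCond s i j := h j (by omega)
    rw [ih (fun t ht => h t (by omega))]
    rw [pvCountAt, if_pos (show i + j < s.length ∧ s.getD j ' ' = s.getD (i + j) ' ' from hj)]

theorem pvCountAt_zero (s : List Char) : pvCountAt s 0 0 = s.length := by
  have h := pvCountAt_congr s 0 s.length (fun t ht => ⟨by omega, by rw [Nat.zero_add]⟩)
  rw [h, pvCountAt, if_neg (by omega)]

theorem pvGoR_eq (s : List Char) (r l : Nat) (h : l ≤ r) :
    pvGoR s l r = l + pvCountAt s l (r - l) := by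
  induction r using pvGoR.induct s l with
  | case1 r hc ih =>
    by_cases h' : l ≤ r
    · rw [pvGoR, if_pos hc, ih (by omega)]
      have hrl : r + 1 - l = (r - l) + 1 := by omega
      have hcc : l + (r - l) < s.length ∧ s.getD (r - l) ' ' = s.getD (l + (r - l)) ' ' := by
        rw [show l + (r - l) = r from by omega]; exact hc
      have : pvCountAt s l (r - l) = pvCountAt s l ((r - l) + 1) := by
        rw [pvCountAt, if_pos hcc]
      rw [hrl, ← this]
    · omega
  | case2 r hc =>
    rw [pvGoR, if_neg hc]
    have hstop : ¬ (l + (r - l) < s.length ∧ s.getD (r - l) ' ' = s.getD (l + (r - l)) ' ') := by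
      rw [show l + (r - l) = r from by omega]; exact hc
    rw [pvCountAt, if_neg hstop]
    omega

-- matches inside the box [l,r] copy matches at k = i - l
theorem pvBox (s : List Char) (l r i t : Nat) (hli : l ≤ i)
    (hbox : r - l + 1 ≤ pvCountAt s l 0) (ht : i + t ≤ r) :
    i + t < s.length ∧ s.getD ((i - l) + t) ' ' = s.getD (i + t) ' ' := by
  have hlt : (i - l) + t < pvCountAt s l 0 := by omega
  obtain ⟨h1, h2⟩ := pvCountAt_mem s l 0 ((i - l) + t) (Nat.zero_le _) hlt
  rw [show l + ((i - l) + t) = i + t from by omega] at h1 h2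
  exact ⟨h1, h2⟩

theorem pvCopy (s : List Char) (l r i : Nat) (hli : l ≤ i) (hir : i ≤ r)
    (hbox : r - l + 1 ≤ pvCountAt s l 0)
    (hk : pvCountAt s (i - l) 0 < r - i + 1) :
    pvCountAt s i 0 = pvCountAt s (i - l) 0 := by
  have hge : ∀ t < pvCountAt s (i - l) 0, pvCond s i t := by
    intro t ht
    obtain ⟨hk1, hk2⟩ := pvCountAt_mem s (i - l) 0 t (Nat.zero_le _) ht
    obtain ⟨hb1, hb2⟩ := pvBox s l r i t hli hbox (by omega)
    exact ⟨hb1, hk2.trans hb2⟩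
  have h1 : pvCountAt s (i - l) 0 ≤ pvCountAt s i 0 := by
    rw [pvCountAt_congr s i _ hge]; exact pvCountAt_ge s i _
  rcases Nat.lt_or_ge (pvCountAt s (i - l) 0) (pvCountAt s i 0) with hlt | hge'
  · exfalso
    obtain ⟨c1, c2⟩ := pvCountAt_mem s i 0 _ (Nat.zero_le _) hlt
    obtain ⟨b1, b2⟩ := pvBox s l r i (pvCountAt s (i - l) 0) hli hbox (by omega)
    exact pvCountAt_stop s (i - l) 0 ⟨by omega, c2.trans b2.symm⟩
  · omega

theorem pvExtend (s : List Char) (l r i : Nat) (hli : l ≤ i) (hir : i ≤ r)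
    (hbox : r - l + 1 ≤ pvCountAt s l 0)
    (hk : r - i + 1 ≤ pvCountAt s (i - l) 0) :
    pvCountAt s i 0 = pvCountAt s i (r - i) := by
  refine pvCountAt_congr s i (r - i) (fun t ht => ?_)
  obtain ⟨hk1, hk2⟩ := pvCountAt_mem s (i - l) 0 t (Nat.zero_le _) (by omega)
  obtain ⟨hb1, hb2⟩ := pvBox s l r i t hli hbox (by omega)
  exact ⟨hb1, hk2.trans hb2⟩

-- loop invariant for A's fold after processing indices 1..m
def pvInv (s : List Char) (m : Nat) (st : List Nat × Nat × Nat × Nat) : Prop :=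
  st.1.length = s.length ∧
  (∀ j < s.length, st.1.getD j 0 = if 1 ≤ j ∧ j ≤ m then pvCountAt s j 0 else 0) ∧
  st.2.1 ≤ m ∧ (1 ≤ st.2.2.1 → 1 ≤ st.2.1) ∧
  (st.2.1 ≤ st.2.2.1 → st.2.2.1 - st.2.1 + 1 ≤ pvCountAt s st.2.1 0)

theorem pvZset (s : List Char) (m : Nat) (z : List Nat) (hm : m + 1 < s.length)
    (hlen : z.length = s.length)
    (hz : ∀ j < s.length, z.getD j 0 = if 1 ≤ j ∧ j ≤ m then pvCountAt s j 0 else 0) :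
    ∀ j < s.length, (z.set (m + 1) (pvCountAt s (m + 1) 0)).getD j 0 =
      if 1 ≤ j ∧ j ≤ m + 1 then pvCountAt s j 0 else 0 := by
  intro j hj
  by_cases hji : j = m + 1
  · subst hji
    have h1 : (z.set (m + 1) (pvCountAt s (m + 1) 0)).getD (m + 1) 0 = pvCountAt s (m + 1) 0 := by
      simp [List.getD_eq_getElem?_getD, show m + 1 < z.length from by omega]
    rw [h1, if_pos ⟨by omega, le_rfl⟩]
  · have h1 : (z.set (m + 1) (pvCountAt s (m + 1) 0)).getD j 0 = z.getD j 0 := by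
      simp [List.getD_eq_getElem?_getD, Ne.symm hji]
    rw [h1, hz j hj]
    by_cases hc : 1 ≤ j ∧ j ≤ m
    · rw [if_pos hc, if_pos ⟨hc.1, by omega⟩]
    · rw [if_neg hc, if_neg (by omega)]

theorem pvInv_step (s : List Char) (m : Nat) (st : List Nat × Nat × Nat × Nat)
    (h : pvInv s m st) (hm : m + 1 < s.length) :
    pvInv s (m + 1) (pvStepA s st (m + 1)) := by
  obtain ⟨z, l, r, k⟩ := st
  obtain ⟨hlen, hz, hlm, hrl, hbox⟩ := h
  dsimp only at hlen hz hlm hrl hbox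
  simp only [pvStepA]
  by_cases h1 : m + 1 > r
  · rw [if_pos h1]
    have hgo : pvGoR s (m + 1) (m + 1) = (m + 1) + pvCountAt s (m + 1) 0 := by
      rw [pvGoR_eq s (m + 1) (m + 1) le_rfl, Nat.sub_self]
    unfold pvInv
    refine ⟨by simp [hlen], ?_, le_rfl, by dsimp only; intro _; omega, ?_⟩
    · rw [hgo, Nat.add_sub_cancel_left]
      exact pvZset s m z hm hlen hz
    · dsimp only
      rw [hgo]
      intro hle
      omega
  · rw [if_neg h1]
    have hr1 : m + 1 ≤ r := by omega
    have hl1 : 1 ≤ l := hrl (by omega)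
    have hlm' : l ≤ m := hlm
    have hzk : z.getD (m + 1 - l) 0 = pvCountAt s (m + 1 - l) 0 := by
      rw [hz _ (by omega), if_pos ⟨by omega, by omega⟩]
    have hbox' : r - l + 1 ≤ pvCountAt s l 0 := hbox (by omega)
    by_cases h2 : z.getD (m + 1 - l) 0 < r - (m + 1) + 1
    · rw [if_pos h2]
      rw [hzk] at h2
      have hcopy : pvCountAt s (m + 1) 0 = pvCountAt s (m + 1 - l) 0 :=
        pvCopy s l r (m + 1) (by omega) hr1 hbox' h2
      unfold pvInv
      refine ⟨by simp [hlen], ?_, by dsimp only; omega, by dsimp only; exact hrl, by dsimp only; exact hbox⟩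
      rw [hzk, ← hcopy]
      exact pvZset s m z hm hlen hz
    · rw [if_neg h2]
      rw [hzk] at h2
      have hgo : pvGoR s (m + 1) r = (m + 1) + pvCountAt s (m + 1) 0 := by
        rw [pvGoR_eq s r (m + 1) hr1,
          ← pvExtend s l r (m + 1) (by omega) hr1 hbox' (by omega)]
      unfold pvInv
      refine ⟨by simp [hlen], ?_, le_rfl, by dsimp only; intro _; omega, ?_⟩
      · rw [hgo, Nat.add_sub_cancel_left]
        exact pvZset s m z hm hlen hz
      · dsimp only
        rw [hgo]
        intro hle
        omega

theorem pvInv_fold_aux (s : List Char) (hn : 1 ≤ s.length) (m : Nat) (hm : m ≤ s.length - 1) :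
    pvInv s m ((List.range' 1 m).foldl (pvStepA s) (List.replicate s.length 0, 0, 0, 0)) := by
  induction m with
  | zero =>
    rw [show List.range' 1 0 = ([] : List Nat) from rfl, List.foldl_nil]
    refine ⟨by simp, ?_, le_rfl, by intro h; omega, ?_⟩
    · intro j hj
      rw [if_neg (by omega)]
      simp [List.getD_eq_getElem?_getD, hj]
    · intro _
      dsimp only
      rw [pvCountAt_zero]
      omega
  | succ m ih =>
    rw [List.range'_concat, List.foldl_append, List.foldl_cons, List.foldl_nil]
    have h1m : 1 + 1 * m = m + 1 := by omega
    rw [h1m]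
    exact pvInv_step s m _ (ih (by omega)) (by omega)

theorem pvInv_fold (s : List Char) (hn : 1 ≤ s.length) :
    pvInv s (s.length - 1)
      ((List.range' 1 (s.length - 1)).foldl (pvStepA s) (List.replicate s.length 0, 0, 0, 0)) :=
  pvInv_fold_aux s hn (s.length - 1) le_rfl

theorem pv_sum_foldl (s : List Char) (l : List Nat) (c : Nat) :
    l.foldl (fun total i => total + pvCountAt s i 0) c = c + (l.map (fun i => pvCountAt s i 0)).sum := by
  induction l generalizing c with
  | nil => simp
  | cons a l ih => simp [ih]; omega

theorem pv_z_eq (s : List Char) (z : List Nat) (hn : 1 ≤ s.length)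
    (hlen : z.length = s.length)
    (hz : ∀ j < s.length, z.getD j 0 = if 1 ≤ j ∧ j ≤ s.length - 1 then pvCountAt s j 0 else 0) :
    z = 0 :: (List.range' 1 (s.length - 1)).map (fun i => pvCountAt s i 0) := by
  apply List.ext_getElem
  · simp [hlen]; omega
  · intro i h1 h2
    have hi : i < s.length := by omega
    have hget : z[i] = z.getD i 0 := (List.getD_eq_getElem z 0 h1).symm
    rw [hget, hz i hi]
    match i, hi with
    | 0, _ => simp
    | (j + 1), hj =>
      rw [List.getElem_cons_succ, List.getElem_map, List.getElem_range']
      rw [if_pos ⟨by omega, by omega⟩, show 1 + 1 * j = j + 1 from by omega]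

-- ===== VERDICT (by name: the statement is the Claim_ definition above) =====
theorem stringSimilarity_spec : Claim_equal_stringSimilarity := by
  intro string _
  unfold Spec_stringSimilarity
  dsimp only [stringSimilarity, stringSimilarity_alt]
  set s := string.toList with hs
  by_cases hn : s.length = 0
  · simp [hn]
  · have hn1 : 1 ≤ s.length := by omega
    obtain ⟨hlen, hz, -, -, -⟩ := pvInv_fold s hn1
    have hzeq := pv_z_eq s _ hn1 hlen hz
    rw [hzeq]
    rw [pv_sum_foldl s (List.range s.length) 0]
    rw [List.range_eq_range', show s.length = (s.length - 1) + 1 from by omega,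
      List.range'_succ, List.map_cons, List.sum_cons, List.sum_cons, pvCountAt_zero]
    push_cast
    ring_nf
    omega
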